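-- pv_equiv track=rewrite | github.com/tachyon83/code-rhino | DAY62-Programmers-멀쩡한 사각형/sinholee.py | solution
-- ===== SOURCE A (Python) =====
-- def solution(w, h):
--     answer = w*h
--     small = gcd(w, h)
--     W = w // small
--     H = h // small
--
--     answer -= small * H * W
--     safe = 0
--     for i in range(1, W):
--         safe += i * H//W
--     return answer + safe * 2 * small
--
-- def gcd(a, b):
--     if a == 0:
--         return b
--     return gcd(b % a, a)
-- ===== SOURCE B (Python) =====
-- def solution(w, h):
--     a, b = w, h
--     while a:
--         a, b = b % a, a
--     g = b
--     W = w // g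
--     H = h // g
--     safe2 = (W - 1) * (H - 1) if W >= 1 else 0
--     return w * h - g * W * H + g * safe2
-- ===== Notes on version B (the rewrite author's own statement) =====
-- stated objective: faster
-- what changed: Replaced A's O(W) loop summing i*H//W over range(1, W) by the closed form (W-1)*(H-1)/2 (valid because W=w/gcd and H=h/gcd are coprime, proved by the reflection pairing floor(iH/W)+floor((W-i)H/W)=H-1), and A's recursive gcd by an iterative while-loop; only the gcd remains, so B runs in O(log min(|w|,|h|)).
import Mathlib
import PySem

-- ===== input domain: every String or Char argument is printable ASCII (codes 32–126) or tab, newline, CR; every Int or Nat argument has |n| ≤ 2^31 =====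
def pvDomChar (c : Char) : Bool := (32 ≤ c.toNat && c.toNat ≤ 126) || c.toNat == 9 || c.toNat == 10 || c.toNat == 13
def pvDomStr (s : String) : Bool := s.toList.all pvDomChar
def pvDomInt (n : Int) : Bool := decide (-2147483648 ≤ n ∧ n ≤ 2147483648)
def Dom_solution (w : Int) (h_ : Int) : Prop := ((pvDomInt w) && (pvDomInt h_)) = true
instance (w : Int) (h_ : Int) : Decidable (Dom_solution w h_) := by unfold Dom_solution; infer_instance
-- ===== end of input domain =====

-- B replaces A's O(W) loop summing i*H//W by the closed form (W-1)(H-1) (valid since W, H are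
-- coprime after dividing by the gcd), and the recursive gcd by an iterative one: asymptotically faster.

-- Python's % has |b % a| < |a| for a ≠ 0; used for termination of both gcd ports.
theorem pyMod_natAbs_lt (b a : Int) (h : a ≠ 0) : (PySem.Int.mod b a).natAbs < a.natAbs := by
  have hd := Int.fmod_eq_emod (a := b) (b := a)
  have h1 : 0 ≤ b % a := Int.emod_nonneg b h
  have h2 : b % a < (a.natAbs : Int) := Int.emod_lt b h
  simp only [PySem.Int.mod, hd]
  split_ifs <;> omega

-- ===== PORT A =====
-- A's helper gcd(a, b): recursive Euclid with Python's %.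
def pyGcd (a b : Int) : Int :=
  if a = 0 then b else pyGcd (PySem.Int.mod b a) a
termination_by a.natAbs
decreasing_by exact pyMod_natAbs_lt b a (by assumption)

def solution (w : Int) (h_ : Int) : Int :=
  let answer := w * h_
  let small := pyGcd w h_
  let W := PySem.Int.floordiv w small
  let H := PySem.Int.floordiv h_ small
  let answer2 := answer - small * H * W
  let safe := (PySem.List.pyRange 1 W 1).foldl
      (fun s i => s + PySem.Int.floordiv (i * H) W) 0
  answer2 + safe * 2 * small

-- ===== PORT B =====
-- B's gcd: the 'while a: a, b = b % a, a' loop, as a recursion on the loop state.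
def gcdLoop (a b : Int) : Int :=
  if a = 0 then b else gcdLoop (PySem.Int.mod b a) a
termination_by a.natAbs
decreasing_by exact pyMod_natAbs_lt b a (by assumption)

def solution_alt (w : Int) (h_ : Int) : Int :=
  let g := gcdLoop w h_
  let W := PySem.Int.floordiv w g
  let H := PySem.Int.floordiv h_ g
  let safe2 := if 1 ≤ W then (W - 1) * (H - 1) else 0
  w * h_ - g * W * H + g * safe2

-- ===== PRECONDITION & SPEC =====
-- Pre_ excludes only w = h = 0, where A raises ZeroDivisionError (gcd is 0 there).
def Pre_solution (w : Int) (h_ : Int) : Prop := ¬(w = 0 ∧ h_ = 0)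
instance (w : Int) (h_ : Int) : Decidable (Pre_solution w h_) := by unfold Pre_solution; infer_instance
def pvWitness_solution : Int × Int := (8, 12)

def Spec_solution (w : Int) (h_ : Int) (out : Int) : Prop := out = solution_alt w h_
instance (w : Int) (h_ : Int) (out : Int) : Decidable (Spec_solution w h_ out) := by unfold Spec_solution; infer_instance

-- ===== CLAIM (what is proved, stated in full; the proofs are below) =====
def Claim_equal_solution : Prop := ∀ (w : Int) (h_ : Int), Dom_solution w h_ → Pre_solution w h_ → Spec_solution w h_ (solution w h_)

-- ===== LEMMAS AND PROOFS =====

-- The two gcd ports (recursive vs loop-state recursion) compute the same value.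
theorem gcdLoop_eq_pyGcd (a b : Int) : gcdLoop a b = pyGcd a b := by
  rw [gcdLoop, pyGcd]
  split_ifs with h
  · rfl
  · exact gcdLoop_eq_pyGcd (PySem.Int.mod b a) a
termination_by a.natAbs
decreasing_by exact pyMod_natAbs_lt b a (by assumption)

theorem pyGcd_dvd (a b : Int) : pyGcd a b ∣ a ∧ pyGcd a b ∣ b := by
  rw [pyGcd]
  split_ifs with h
  · exact ⟨h ▸ dvd_zero _, dvd_refl _⟩
  · obtain ⟨h1, h2⟩ := pyGcd_dvd (PySem.Int.mod b a) a
    refine ⟨h2, ?_⟩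
    have hb : PySem.Int.mod b a + a * Int.fdiv b a = b := by
      simp only [PySem.Int.mod, Int.fmod_def]; ring
    have := dvd_add h1 (Dvd.dvd.mul_right h2 (Int.fdiv b a))
    rwa [hb] at this
termination_by a.natAbs
decreasing_by exact pyMod_natAbs_lt b a (by assumption)

theorem pyGcd_natAbs (a b : Int) : (pyGcd a b).natAbs = Int.gcd a b := by
  rw [pyGcd]
  split_ifs with h
  · subst h; simp [Int.gcd]
  · rw [pyGcd_natAbs (PySem.Int.mod b a) a]
    have : PySem.Int.mod b a = b + (-(Int.fdiv b a)) * a := by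
      simp only [PySem.Int.mod, Int.fmod_def]; ring
    rw [this]
    show Int.gcd (b + -b.fdiv a * a) a = Int.gcd a b
    rw [Int.gcd_add_mul_right_left a b (-(Int.fdiv b a)), Int.gcd_comm]
termination_by a.natAbs
decreasing_by exact pyMod_natAbs_lt b a (by assumption)

theorem list_sum_range (n : Nat) (f : Nat → Int) :
    ((List.range n).map f).sum = ∑ i ∈ Finset.range n, f i := by
  induction n with
  | zero => simp
  | succ m ih => rw [Finset.sum_range_succ, List.range_succ]; simp [ih]

-- reflection pairing: for coprime W H and 0 < i < W the two floors sum to H - 1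
theorem pair_floor (W H i : Int) (hW : 0 < W) (hcop : Int.gcd W H = 1)
    (hi1 : 1 ≤ i) (hi2 : i < W) :
    PySem.Int.floordiv (i * H) W + PySem.Int.floordiv ((W - i) * H) W = H - 1 := by
  have hW0 : W ≠ 0 := by omega
  have hndvd : ¬ W ∣ i * H := by
    intro hdvd
    have hcop' : IsCoprime W H := Int.isCoprime_iff_gcd_eq_one.mpr hcop
    have : W ∣ i := hcop'.dvd_of_dvd_mul_right hdvd
    have := Int.le_of_dvd (by omega) this
    omega
  rw [PySem.Int.floordiv_eq_ediv_of_pos hW, PySem.Int.floordiv_eq_ediv_of_pos hW]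
  have h1 : (W - i) * H = -(i * H) + H * W := by ring
  rw [h1, Int.add_mul_ediv_right _ _ hW0, Int.neg_ediv]
  rw [if_neg hndvd, Int.sign_eq_one_of_pos hW]
  ring

theorem sum_floor_closed (W H : Int) (hW : 2 ≤ W) (hcop : Int.gcd W H = 1) :
    2 * ((PySem.List.pyRange 1 W 1).foldl
      (fun s i => s + PySem.Int.floordiv (i * H) W) 0) = (W - 1) * (H - 1) := by
  set f : Int → Int := fun i => PySem.Int.floordiv (i * H) W with hf
  rw [PySem.List.foldl_add _ f 0, PySem.List.pyRange_one, List.map_map, zero_add]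
  simp only [Function.comp_def]
  set n : Nat := (W - 1).toNat with hn
  have hWn : W = (n : Int) + 1 := by omega
  rw [list_sum_range n (fun k => f (1 + (k : Int)))]
  have key : ∀ k ∈ Finset.range n,
      f (1 + (k : Int)) + f (1 + ((n - 1 - k : Nat) : Int)) = H - 1 := by
    intro k hk
    have hkn : k < n := Finset.mem_range.mp hk
    have hcast : (1 + ((n - 1 - k : Nat) : Int)) = W - (1 + (k : Int)) := by
      have : ((n - 1 - k : Nat) : Int) = (n : Int) - 1 - k := by omega
      omega
    rw [hcast, hf]
    exact pair_floor W H (1 + (k : Int)) (by omega) hcop (by omega) (by omega)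
  calc 2 * ∑ k ∈ Finset.range n, f (1 + (k : Int))
      = (∑ k ∈ Finset.range n, f (1 + (k : Int)))
        + ∑ k ∈ Finset.range n, f (1 + ((n - 1 - k : Nat) : Int)) := by
        rw [Finset.sum_range_reflect (fun k => f (1 + (k : Int))) n]; ring
    _ = ∑ k ∈ Finset.range n, (f (1 + (k : Int)) + f (1 + ((n - 1 - k : Nat) : Int))) := by
        rw [Finset.sum_add_distrib]
    _ = ∑ _k ∈ Finset.range n, (H - 1) := Finset.sum_congr rfl key
    _ = (n : Int) * (H - 1) := by rw [Finset.sum_const]; simp [mul_comm]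
    _ = (W - 1) * (H - 1) := by rw [hWn]; ring

-- coprimality of w/g and h/g for g = pyGcd w h
theorem quot_coprime (w h_ : Int) (hpre : ¬(w = 0 ∧ h_ = 0)) :
    Int.gcd (w / pyGcd w h_) (h_ / pyGcd w h_) = 1 := by
  set g := pyGcd w h_ with hg
  have hna : g.natAbs = Int.gcd w h_ := pyGcd_natAbs w h_
  have hgcd0 : Int.gcd w h_ ≠ 0 := fun h0 => hpre (Int.gcd_eq_zero_iff.mp h0)
  have hgpos : 0 < Int.gcd w h_ := Nat.pos_of_ne_zero hgcd0
  rcases lt_or_gt_of_ne (show g ≠ 0 by intro h0; rw [h0] at hna; simp at hna; omega) with hneg | hpos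
  · have hgeq : g = -((Int.gcd w h_ : Nat) : Int) := by omega
    rw [hgeq, Int.ediv_neg, Int.ediv_neg, Int.neg_gcd, Int.gcd_neg]
    exact Int.gcd_div_gcd_div_gcd hgpos
  · have hgeq : g = ((Int.gcd w h_ : Nat) : Int) := by omega
    rw [hgeq]
    exact Int.gcd_div_gcd_div_gcd hgpos

-- ===== VERDICT (by name: the statement is the Claim_ definition above) =====
theorem solution_spec : Claim_equal_solution := by
  intro w h_ _ hpre
  show solution w h_ = solution_alt w h_
  simp only [solution, solution_alt, gcdLoop_eq_pyGcd]
  set g := pyGcd w h_ with hg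
  have hgne : g ≠ 0 := by
    intro h0
    have hna : g.natAbs = Int.gcd w h_ := pyGcd_natAbs w h_
    rw [h0] at hna; simp at hna
    exact hpre (Int.gcd_eq_zero_iff.mp hna.symm)
  obtain ⟨hdw, hdh⟩ := pyGcd_dvd w h_
  have hWe : PySem.Int.floordiv w g = w / g := by
    simp only [PySem.Int.floordiv]; exact Int.fdiv_eq_ediv_of_dvd hdw
  have hHe : PySem.Int.floordiv h_ g = h_ / g := by
    simp only [PySem.Int.floordiv]; exact Int.fdiv_eq_ediv_of_dvd hdh
  rw [hWe, hHe]
  set W := w / g with hW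
  set H := h_ / g with hH
  rcases le_or_gt W 1 with hle | hgt
  · -- range(1, W) is empty and the closed form is 0 or (W-1)(H-1) with W = 1
    have hempty : PySem.List.pyRange 1 W 1 = [] := by
      rw [PySem.List.pyRange_one]
      have : (W - 1).toNat = 0 := by omega
      rw [this]; rfl
    rw [hempty]
    simp only [List.foldl_nil]
    rcases eq_or_lt_of_le hle with heq | hlt
    · rw [if_pos (le_of_eq heq.symm), ← heq]; ring
    · rw [if_neg (by omega)]; ring
  · -- W ≥ 2: the loop sum doubles to (W-1)(H-1)
    have hcop : Int.gcd W H = 1 := quot_coprime w h_ hpre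
    have hsum := sum_floor_closed W H (by omega) hcop
    rw [if_pos (by omega)]
    linear_combination g * hsum
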